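-- pv_equiv track=rewrite | github.com/miliar/Code_Jam_Webscraper | solutions_python/Problem_155/2836.py | process
-- ===== SOURCE A (Python) =====
-- def process(p):
-- 	needed = 0
-- 	people = 0
-- 	lvl = 0
-- 	for x in p:
-- 		peeps = int(x)
-- 		if lvl > people:
-- 			a = lvl - people
-- 			needed += a
-- 			people += a
-- 		lvl += 1
-- 		people += peeps
-- 	return needed
-- ===== SOURCE B (Python) =====
-- def process(p):
--     needed = 0
--     for x in reversed(p[:-1]):
--         needed = max(0, needed + 1 - int(x))
--     return needed
-- ===== Notes on version B (the rewrite author's own statement) =====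
-- stated objective: simpler
-- what changed: Replaces the forward greedy top-up that maintains people/lvl counters and pays each deficit as it appears with a Kadane-style backward scan over p[:-1] that keeps a single clamped suffix deficit, needed = max(0, needed + 1 - int(x)).
import Mathlib
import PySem

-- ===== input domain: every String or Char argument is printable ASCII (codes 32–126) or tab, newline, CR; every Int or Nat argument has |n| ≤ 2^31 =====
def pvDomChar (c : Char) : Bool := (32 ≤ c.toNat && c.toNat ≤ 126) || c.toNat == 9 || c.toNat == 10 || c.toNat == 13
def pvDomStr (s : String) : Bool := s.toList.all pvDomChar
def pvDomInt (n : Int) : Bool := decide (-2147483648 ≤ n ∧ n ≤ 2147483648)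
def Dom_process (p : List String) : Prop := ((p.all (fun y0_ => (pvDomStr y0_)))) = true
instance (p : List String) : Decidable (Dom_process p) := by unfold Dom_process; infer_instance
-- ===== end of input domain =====

-- B replaces A's forward greedy top-up (people/lvl counters) with a backward scan over
-- p[:-1] keeping one clamped suffix deficit; return values agree wherever int(x) parses.

-- ===== PORT A =====
-- state = (needed, people, lvl); int(x) via PySem.Int.ofStr? — the .getD 0 is only
-- reached outside Pre_process (where Python's int(x) raises ValueError).
def stepA (st : Int × Int × Int) (x : String) : Int × Int × Int :=
  let peeps := (PySem.Int.ofStr? x).getD 0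
  if st.2.2 > st.2.1 then
    (st.1 + (st.2.2 - st.2.1), st.2.2 + peeps, st.2.2 + 1)
  else
    (st.1, st.2.1 + peeps, st.2.2 + 1)

def process (p : List String) : Int :=
  (p.foldl stepA (0, 0, 0)).1

-- ===== PORT B =====
-- for x in reversed(p[:-1]): needed = max(0, needed + 1 - int(x))
def stepB (needed : Int) (x : String) : Int :=
  max 0 (needed + 1 - (PySem.Int.ofStr? x).getD 0)

def process_alt (p : List String) : Int :=
  ((PySem.List.slice p none (some (-1))).reverse).foldl stepB 0

-- ===== PRECONDITION & SPEC =====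
-- Pre_ excludes exactly the inputs where Python's int(x) raises ValueError on some element.
def Pre_process (p : List String) : Prop :=
  (p.all (fun x => (PySem.Int.ofStr? x).isSome)) = true
instance (p : List String) : Decidable (Pre_process p) := by unfold Pre_process; infer_instance

def pvWitness_process : List String := ["2", "0", " -1 ", "+3"]

def Spec_process (p : List String) (out : Int) : Prop := out = process_alt p
instance (p : List String) (out : Int) : Decidable (Spec_process p out) := by unfold Spec_process; infer_instance

-- ===== CLAIM =====
def Claim_equal_process : Prop := ∀ (p : List String), Dom_process p → Pre_process p → Spec_process p (process p)

-- ===== LEMMAS AND PROOFS =====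

-- B as a structural recursion: process_alt p = suffixDef p (foldr over dropLast).
def suffixDef (p : List String) : Int := (p.dropLast).foldr (fun x acc => stepB acc x) 0

theorem process_alt_eq (p : List String) : process_alt p = suffixDef p := by
  unfold process_alt suffixDef
  rw [PySem.List.slice_to_neg_one, List.foldl_reverse]

theorem suffixDef_nonneg (p : List String) : 0 ≤ suffixDef p := by
  unfold suffixDef
  cases h : p.dropLast with
  | nil => simp
  | cons x t => simp [stepB]

theorem suffixDef_cons (x : String) (y : String) (t : List String) :
    suffixDef (x :: y :: t) = stepB (suffixDef (y :: t)) x := by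
  unfold suffixDef
  rfl

-- The key invariant: A's fold from state (n, s + n, i) returns max n (i - s + suffixDef l).
theorem foldA_eq : ∀ (l : List String), l ≠ [] → ∀ (n s i : Int),
    (l.foldl stepA (n, s + n, i)).1 = max n (i - s + suffixDef l) := by
  intro l
  induction l with
  | nil => intro h; exact absurd rfl h
  | cons x t ih =>
    intro _ n s i
    cases t with
    | nil =>
      have h0 : suffixDef [x] = 0 := rfl
      rw [h0]
      simp only [List.foldl_cons, List.foldl_nil, stepA]
      split_ifs with h <;> dsimp only <;> omega
    | cons y t' =>
      set a := (PySem.Int.ofStr? x).getD 0 with ha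
      have hstep : stepA (n, s + n, i) x = (max n (i - s), (s + a) + max n (i - s), i + 1) := by
        simp only [stepA, ← ha]
        split_ifs with h <;> simp only [Prod.mk.injEq] <;> refine ⟨by omega, by omega, trivial⟩
      rw [List.foldl_cons, hstep, ih (by simp) (max n (i - s)) (s + a) (i + 1), suffixDef_cons]
      simp only [stepB, ← ha]
      omega

-- ===== VERDICT =====
theorem process_spec : Claim_equal_process := by
  intro p _ _
  unfold Spec_process
  rw [process_alt_eq]
  cases p with
  | nil => simp [process, suffixDef]
  | cons x t =>
    have h := foldA_eq (x :: t) (by simp) 0 0 0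
    have hnn := suffixDef_nonneg (x :: t)
    unfold process
    simp only [add_zero] at h
    rw [h]
    omega
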